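-- pv_equiv track=rewrite | github.com/lmxy0212/Python | Lab/lab5.py | product_evens
-- ===== SOURCE A (Python) =====
-- def product_evens(lst,ind):
--     if ind == len(lst):
--         return 1
--     else:
--         if lst[ind]%2==0 and lst[ind] <= len(lst):
--             return(lst[ind]*product_evens(lst,ind+1))
--         else:
--             return(product_evens(lst,ind+1))
-- ===== SOURCE B (Python) =====
-- def product_evens(lst, ind):
--     result = 1
--     n = len(lst)
--     for i in range(ind, n):
--         x = lst[i]
--         if x % 2 == 0 and x <= n:
--             result *= x
--     return result
-- ===== Notes on version B (the rewrite author's own statement) =====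
-- stated objective: simpler
-- what changed: Replaces the tail recursion over the index with a single iterative loop over range(ind, len(lst)) accumulating the product.
import Mathlib
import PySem

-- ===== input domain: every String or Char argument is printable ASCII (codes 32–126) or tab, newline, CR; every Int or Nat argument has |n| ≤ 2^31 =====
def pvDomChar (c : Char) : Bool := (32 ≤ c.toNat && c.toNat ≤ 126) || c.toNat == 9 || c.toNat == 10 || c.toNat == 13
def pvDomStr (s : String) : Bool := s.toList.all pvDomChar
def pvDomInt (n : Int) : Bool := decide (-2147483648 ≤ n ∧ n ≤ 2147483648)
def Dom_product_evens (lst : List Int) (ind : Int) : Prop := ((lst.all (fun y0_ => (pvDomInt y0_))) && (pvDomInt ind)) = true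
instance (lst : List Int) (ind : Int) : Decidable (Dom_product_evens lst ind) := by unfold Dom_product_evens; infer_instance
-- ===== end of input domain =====

-- B replaces A's tail recursion over the index with a single iterative loop over range(ind, len(lst)) (simpler decomposition; return value only).

-- ===== PORT A =====
def product_evens (lst : List Int) (ind : Int) : Int :=
  if ind = (lst.length : Int) then 1
  else
    match h : PySem.List.pyGet? lst ind with
    | none => 0  -- Python raises IndexError here (excluded by Pre_)
    | some x =>
      if PySem.Int.mod x 2 == 0 && x ≤ (lst.length : Int)
      then x * product_evens lst (ind + 1)
      else product_evens lst (ind + 1)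
termination_by ((lst.length : Int) - ind).toNat
decreasing_by
  all_goals
    have hin : PySem.Raise.InRange lst.length ind := by
      by_contra hc
      rw [← PySem.List.pyGet?_eq_none_iff] at hc
      simp [hc] at h
    simp [PySem.Raise.InRange] at hin
    omega

-- ===== PORT B =====
def product_evens_alt (lst : List Int) (ind : Int) : Int :=
  (PySem.List.pyRange ind (lst.length : Int) 1).foldl
    (fun result i =>
      let x := PySem.List.pyGetD lst i 0
      if PySem.Int.mod x 2 == 0 && x ≤ (lst.length : Int) then result * x else result)
    1

-- ===== PRECONDITION & SPEC =====
-- Pre_ excludes exactly the inputs where A's recursion reaches an out-of-range index and raises IndexError.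
def Pre_product_evens (lst : List Int) (ind : Int) : Prop :=
  -(lst.length : Int) ≤ ind ∧ ind ≤ (lst.length : Int)
instance (lst : List Int) (ind : Int) : Decidable (Pre_product_evens lst ind) := by
  unfold Pre_product_evens; infer_instance
def pvWitness_product_evens : List Int × Int := ([2, 3, 4], 0)

def Spec_product_evens (lst : List Int) (ind : Int) (out : Int) : Prop := out = product_evens_alt lst ind
instance (lst : List Int) (ind : Int) (out : Int) : Decidable (Spec_product_evens lst ind out) := by unfold Spec_product_evens; infer_instance

-- ===== CLAIM (what is proved, stated in full; the proofs are below) =====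
def Claim_equal_product_evens : Prop := ∀ (lst : List Int) (ind : Int), Dom_product_evens lst ind → Pre_product_evens lst ind → Spec_product_evens lst ind (product_evens lst ind)
-- ===== LEMMAS AND PROOFS =====

theorem product_evens_key (lst : List Int) :
    ∀ (n : Nat) (ind r : Int), ind + n = (lst.length : Int) → -(lst.length : Int) ≤ ind →
      (PySem.List.pyRange ind (lst.length : Int) 1).foldl
        (fun result i =>
          let x := PySem.List.pyGetD lst i 0
          if PySem.Int.mod x 2 == 0 && x ≤ (lst.length : Int) then result * x else result)
        r = r * product_evens lst ind := by
  intro n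
  induction n with
  | zero =>
    intro ind r hn _
    have hind : ind = (lst.length : Int) := by omega
    rw [PySem.List.pyRange_one_eq_nil (by omega), product_evens]
    simp [hind]
  | succ k ih =>
    intro ind r hn hlo
    have hlt : ind < (lst.length : Int) := by push_cast at hn ⊢; omega
    have hin : PySem.Raise.InRange lst.length ind := by
      simp [PySem.Raise.InRange]; omega
    obtain ⟨x, hx⟩ : ∃ x, PySem.List.pyGet? lst ind = some x := by
      cases hget : PySem.List.pyGet? lst ind with
      | none => rw [PySem.List.pyGet?_eq_none_iff] at hget; exact absurd hin hget
      | some x => exact ⟨x, rfl⟩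
    have hgd : PySem.List.pyGetD lst ind 0 = x := by
      simp [PySem.List.pyGetD, hx]
    have hstep : product_evens lst ind =
        if (PySem.Int.mod x 2 == 0 && decide (x ≤ (lst.length : Int))) = true
        then x * product_evens lst (ind + 1) else product_evens lst (ind + 1) := by
      rw [product_evens, if_neg (by omega : ¬ ind = (lst.length : Int))]
      split
      · next heq => rw [heq] at hx; cases hx
      · next y heq => rw [heq] at hx; injection hx with hxy; rw [hxy]
    rw [PySem.List.pyRange_one_cons hlt, List.foldl_cons, hstep]
    simp only [hgd]
    by_cases hc : (PySem.Int.mod x 2 == 0 && decide (x ≤ (lst.length : Int))) = true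
    · rw [if_pos hc, if_pos hc, ih (ind + 1) (r * x) (by push_cast at hn ⊢; omega) (by omega)]
      ring
    · rw [if_neg hc, if_neg hc, ih (ind + 1) r (by push_cast at hn ⊢; omega) (by omega)]

-- ===== VERDICT (by name: the statement is the Claim_ definition above) =====
theorem product_evens_spec : Claim_equal_product_evens := by
  intro lst ind _ hpre
  obtain ⟨h1, h2⟩ := hpre
  unfold Spec_product_evens product_evens_alt
  rw [product_evens_key lst ((lst.length : Int) - ind).toNat ind 1 (by omega) h1, one_mul]
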